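-- pv_equiv track=rewrite | github.com/kubistar/https-github.com-kubistar-Algorithm | 백준/Bronze/14720. 우유 축제/우유 축제.py | max_milk
-- ===== SOURCE A (Python) =====
-- def max_milk(N, shops):
--     # 현재 마셔야 할 우유 종류를 추적하는 변수 (0: 딸기, 1: 초코, 2: 바나나)
--     current_milk = 0
--     count = 0
--
--     for shop in shops:
--         if shop == current_milk:
--             count += 1
--             current_milk = (current_milk + 1) % 3  # 다음 우유로 변경
--
--     return count
-- ===== SOURCE B (Python) =====
-- def max_milk(N, shops):
--     # Backward DP: c[k] = milk count obtainable from the current suffix if the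
--     # next required milk kind is k.  Built right-to-left; the answer is c[0].
--     c = (0, 0, 0)
--     for shop in reversed(shops):
--         c = tuple((1 + c[(k + 1) % 3]) if shop == k else c[k] for k in range(3))
--     return c[0]
-- ===== Notes on version B (the rewrite author's own statement) =====
-- stated objective: alternative
-- what changed: Replaces A's forward single-state simulation with a right-to-left dynamic program that carries, for every suffix, the answers for all three possible next-expected milk kinds and reads off the one for state 0.
import Mathlib
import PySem

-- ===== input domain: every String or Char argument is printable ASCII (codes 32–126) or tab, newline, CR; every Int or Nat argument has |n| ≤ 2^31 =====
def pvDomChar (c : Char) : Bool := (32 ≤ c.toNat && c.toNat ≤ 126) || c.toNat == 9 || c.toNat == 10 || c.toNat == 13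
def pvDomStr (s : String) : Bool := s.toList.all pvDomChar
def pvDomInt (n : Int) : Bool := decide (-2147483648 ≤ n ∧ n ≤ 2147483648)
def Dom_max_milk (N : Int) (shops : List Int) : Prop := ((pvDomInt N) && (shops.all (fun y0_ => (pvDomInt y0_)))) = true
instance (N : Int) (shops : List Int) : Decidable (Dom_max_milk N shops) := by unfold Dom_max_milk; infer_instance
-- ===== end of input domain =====

-- B replaces A's forward single-state scan with a right-to-left DP carrying the
-- answers for all three possible next-expected milk kinds; alternative decomposition, same cost.


-- ===== PORT A =====
-- state = (current_milk, count), folded over shops exactly as A's for-loop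
def max_milk (N : Int) (shops : List Int) : Int :=
  (shops.foldl (fun (st : Int × Int) shop =>
    if shop == st.1 then (PySem.Int.mod (st.1 + 1) 3, st.2 + 1) else st) (0, 0)).2

-- ===== PORT B =====
-- B's loop over reversed(shops) accumulating the triple c; 'for … in reversed(xs)' is foldr.
-- The tuple comprehension '(1 + c[(k+1)%3]) if shop == k else c[k] for k in range(3)'
-- is written out componentwise for k = 0, 1, 2 ((k+1)%3 = 1, 2, 0).
def max_milk_alt (N : Int) (shops : List Int) : Int :=
  (shops.foldr (fun shop (c : Int × Int × Int) =>
    ( if shop == 0 then 1 + c.2.1 else c.1,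
      if shop == 1 then 1 + c.2.2 else c.2.1,
      if shop == 2 then 1 + c.1 else c.2.2 )) (0, 0, 0)).1

-- ===== PRECONDITION & SPEC =====
def Spec_max_milk (N : Int) (shops : List Int) (out : Int) : Prop := out = max_milk_alt N shops
instance (N : Int) (shops : List Int) (out : Int) : Decidable (Spec_max_milk N shops out) := by unfold Spec_max_milk; infer_instance

-- ===== CLAIM (what is proved, stated in full; the proofs are below) =====
def Claim_equal_max_milk : Prop := ∀ (N : Int) (shops : List Int), Dom_max_milk N shops → Spec_max_milk N shops (max_milk N shops)

-- ===== LEMMAS AND PROOFS =====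
-- B's backward fold, named for the proofs
def pvBFold (shops : List Int) : Int × Int × Int :=
  shops.foldr (fun shop (c : Int × Int × Int) =>
    ( if shop == 0 then 1 + c.2.1 else c.1,
      if shop == 1 then 1 + c.2.2 else c.2.1,
      if shop == 2 then 1 + c.1 else c.2.2 )) (0, 0, 0)

-- select the component of the triple for expected milk e ∈ {0,1,2}
def pvSel (c : Int × Int × Int) (e : Int) : Int :=
  if e = 0 then c.1 else if e = 1 then c.2.1 else c.2.2

-- key invariant: A's forward fold started in state (e, cnt), e ∈ {0,1,2},
-- produces cnt plus the e-component of B's backward DP triple.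
theorem pv_fold_eq (shops : List Int) (e cnt : Int) (he : e = 0 ∨ e = 1 ∨ e = 2) :
    (shops.foldl (fun (st : Int × Int) shop =>
      if shop == st.1 then (PySem.Int.mod (st.1 + 1) 3, st.2 + 1) else st) (e, cnt)).2
    = cnt + pvSel (pvBFold shops) e := by
  induction shops generalizing e cnt with
  | nil =>
    rcases he with rfl | rfl | rfl <;> simp [pvBFold, pvSel]
  | cons x rest ih =>
    simp only [List.foldl_cons, pvBFold, List.foldr_cons]
    by_cases hx : x = e
    · subst hx
      rw [if_pos (by simp)]
      rcases he with rfl | rfl | rfl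
      · rw [show PySem.Int.mod (0 + 1) 3 = 1 by decide, ih 1 (cnt + 1) (by omega)]
        simp [pvBFold, pvSel]; omega
      · rw [show PySem.Int.mod (1 + 1) 3 = 2 by decide, ih 2 (cnt + 1) (by omega)]
        simp [pvBFold, pvSel]; omega
      · rw [show PySem.Int.mod (2 + 1) 3 = 0 by decide, ih 0 (cnt + 1) (by omega)]
        simp [pvBFold, pvSel]; omega
    · rw [if_neg (by simpa using hx), ih e cnt he]
      rcases he with rfl | rfl | rfl <;> simp [pvSel, pvBFold, hx]

-- ===== VERDICT (by name: the statement is the Claim_ definition above) =====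
theorem max_milk_spec : Claim_equal_max_milk := by
  intro N shops _
  unfold Spec_max_milk max_milk max_milk_alt
  have := pv_fold_eq shops 0 0 (Or.inl rfl)
  simpa [pvBFold, pvSel] using this
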